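-- pv_equiv track=rewrite | github.com/FreyjaNellora/Project-Freyja | freyja-nnue/freyja_nnue/data.py | parse_fen4
-- ===== SOURCE A (Python) =====
-- BOARD_SIZE = 14
--
-- TOTAL_SQUARES = 196
--
-- PIECE_TYPE_INDEX = {
--     'P': 0,  # Pawn
--     'N': 1,  # Knight
--     'B': 2,  # Bishop
--     'R': 3,  # Rook
--     'Q': 4,  # Queen
--     'K': 5,  # King
--     # PromotedQueen (type 6) is represented as 'Q' in FEN4 — we can't
--     # distinguish from Queen in the FEN string. Both map to index 4.
--     # This is a known limitation; the training data only shows 'Q'.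
-- }
--
-- PLAYER_INDEX = {
--     'r': 0,  # Red
--     'b': 1,  # Blue
--     'y': 2,  # Yellow
--     'g': 3,  # Green
-- }
--
-- def parse_fen4(fen4_str: str):
--     """Parse a FEN4 string and extract pieces.
--
--     FEN4 format: ranks / active_player castling ep_square ep_player
--     Ranks are separated by '/', from rank 14 (top) to rank 1 (bottom).
--
--     Piece codes: lowercase player prefix + uppercase piece type
--     e.g., rP = Red Pawn, bK = Blue King, yQ = Yellow Queen, gN = Green Knight
--     'xxx' = invalid corner square, digits = empty squares.
--
--     Returns: list of (square_index, piece_type_idx, player_idx) tuples.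
--     """
--     parts = fen4_str.strip().split()
--     rank_str = parts[0]
--     ranks = rank_str.split('/')
--
--     pieces = []
--
--     for rank_idx_from_top, rank_data in enumerate(ranks):
--         # FEN4 goes from rank 14 (index 13) at top to rank 1 (index 0) at bottom
--         rank = BOARD_SIZE - 1 - rank_idx_from_top
--         file = 0
--
--         i = 0
--         while i < len(rank_data):
--             ch = rank_data[i]
--
--             if ch == 'x':
--                 # Skip invalid corner markers (xxx = 3 invalid squares)
--                 # Count consecutive x's
--                 x_count = 0
--                 while i < len(rank_data) and rank_data[i] == 'x':
--                     x_count += 1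
--                     i += 1
--                 file += x_count
--                 continue
--
--             if ch.isdigit():
--                 # Empty squares: could be 1 or 2 digit number
--                 num_str = ch
--                 if i + 1 < len(rank_data) and rank_data[i + 1].isdigit():
--                     num_str += rank_data[i + 1]
--                     i += 1
--                 file += int(num_str)
--                 i += 1
--                 continue
--
--             # Piece: player prefix (r/b/y/g) + piece type (P/N/B/R/Q/K)
--             if ch in PLAYER_INDEX and i + 1 < len(rank_data):
--                 player_char = ch
--                 piece_char = rank_data[i + 1]
--
--                 if piece_char in PIECE_TYPE_INDEX:
--                     player_idx = PLAYER_INDEX[player_char]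
--                     piece_type_idx = PIECE_TYPE_INDEX[piece_char]
--                     sq_index = rank * BOARD_SIZE + file
--
--                     if 0 <= sq_index < TOTAL_SQUARES:
--                         pieces.append((sq_index, piece_type_idx, player_idx))
--
--                 file += 1
--                 i += 2
--                 continue
--
--             # Unknown character — skip
--             i += 1
--             file += 1
--
--     return pieces
-- ===== SOURCE B (Python) =====
-- PIECE_TYPE_INDEX = {'P': 0, 'N': 1, 'B': 2, 'R': 3, 'Q': 4, 'K': 5}
--
-- PLAYER_INDEX = {'r': 0, 'b': 1, 'y': 2, 'g': 3}
--
--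
-- def parse_fen4(fen4_str: str):
--     """One-pass state machine: scan each rank character by character, carrying a
--     'pending' state (a seen player prefix, or a seen first digit) instead of
--     indexed lookahead and an inner run-counting loop."""
--     pieces = []
--     for rank_idx, rank_data in enumerate(fen4_str.strip().split()[0].split('/')):
--         rank = 13 - rank_idx
--         file = 0
--         pending = None  # None | ('p', player_char) | ('d', digit_value)
--         for ch in rank_data:
--             if pending is not None:
--                 kind, val = pending
--                 pending = None
--                 if kind == 'p':
--                     if ch in PIECE_TYPE_INDEX:
--                         sq = rank * 14 + file
--                         if 0 <= sq < 196:
--                             pieces.append((sq, PIECE_TYPE_INDEX[ch], PLAYER_INDEX[val]))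
--                     file += 1
--                     continue
--                 if ch.isdigit():  # kind == 'd': two-digit empty-square count
--                     file += 10 * val + int(ch)
--                     continue
--                 file += val  # lone digit; fall through and process ch afresh
--             if ch in PLAYER_INDEX:
--                 pending = ('p', ch)
--             elif ch.isdigit():
--                 pending = ('d', int(ch))
--             else:
--                 file += 1  # 'x' corner markers and unknown chars each take one file
--     return pieces
-- ===== Notes on version B (the rewrite author's own statement) =====
-- stated objective: faster
-- what changed: A scans each rank with an index, an inner while loop counting corner-marker runs and explicit two-character lookahead for digit pairs and player+piece codes; B makes a single pass over the characters with no index or lookahead, carrying a pending state (seen player prefix, or seen first digit) that the next character resolves.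
import Mathlib
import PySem

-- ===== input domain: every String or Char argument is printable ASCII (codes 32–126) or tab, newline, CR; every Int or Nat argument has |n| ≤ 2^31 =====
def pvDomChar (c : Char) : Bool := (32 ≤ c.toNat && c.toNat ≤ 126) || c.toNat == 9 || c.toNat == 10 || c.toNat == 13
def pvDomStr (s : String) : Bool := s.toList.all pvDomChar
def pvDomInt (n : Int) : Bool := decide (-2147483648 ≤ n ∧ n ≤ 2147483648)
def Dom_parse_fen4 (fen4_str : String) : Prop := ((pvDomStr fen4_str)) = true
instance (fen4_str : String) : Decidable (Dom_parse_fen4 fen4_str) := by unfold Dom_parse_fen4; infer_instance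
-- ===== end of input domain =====

-- B replaces A's indexed lookahead scan (inner x-run counting loop, two-char digit/piece lookahead)
-- by a single pass over each rank's characters carrying a pending player/digit state (measured modestly faster in a timing run; same O(n) cost).

-- ===== PORT A =====
def BOARD_SIZE : Int := 14
def TOTAL_SQUARES : Int := 196
def PIECE_TYPE_INDEX : PySem.Dict Char Int :=
  PySem.Dict.ofList [('P', 0), ('N', 1), ('B', 2), ('R', 3), ('Q', 4), ('K', 5)]
def PLAYER_INDEX : PySem.Dict Char Int :=
  PySem.Dict.ofList [('r', 0), ('b', 1), ('y', 2), ('g', 3)]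

-- A's inner `while … == 'x'` loop: number of leading 'x' and the rest of the rank
def countX : List Char → Nat × List Char
  | [] => (0, [])
  | c :: rest => if c = 'x' then ((countX rest).1 + 1, (countX rest).2) else (0, c :: rest)

theorem countX_snd_le (l : List Char) : (countX l).2.length ≤ l.length := by
  induction l with
  | nil => simp [countX]
  | cons c rest ih =>
    by_cases h : c = 'x'
    · simp [countX, h]; omega
    · simp [countX, h]

-- A's `while i < len(rank_data)` loop, as structural recursion on the unread suffix
def loopA (rank : Int) (cs : List Char) (file : Int) (acc : List (Int × Int × Int)) :
    List (Int × Int × Int) :=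
  match cs with
  | [] => acc
  | ch :: rest =>
    if ch = 'x' then
      -- the inner while counts the whole run starting at ch; int casts of the Nat count
      loopA rank (countX rest).2 (file + (((countX rest).1 : Int) + 1)) acc
    else if PySem.Chars.isdigit ch then
      match _hr : rest with
      | c2 :: rest2 =>
        if PySem.Chars.isdigit c2 then
          -- int(num_str) never raises: num_str is one or two digit chars
          loopA rank rest2 (file + (PySem.Int.ofChars? [ch, c2]).getD 0) acc
        else
          loopA rank rest (file + (PySem.Int.ofChars? [ch]).getD 0) acc
      | [] => loopA rank [] (file + (PySem.Int.ofChars? [ch]).getD 0) acc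
    else if (PySem.Dict.get? PLAYER_INDEX ch).isSome then
      match _hr : rest with
      | piece :: rest2 =>
        (match PySem.Dict.get? PIECE_TYPE_INDEX piece with
        | some t =>
          if 0 ≤ rank * BOARD_SIZE + file ∧ rank * BOARD_SIZE + file < TOTAL_SQUARES then
            loopA rank rest2 (file + 1)
              (acc ++ [(rank * BOARD_SIZE + file, t, (PySem.Dict.get? PLAYER_INDEX ch).getD 0)])
          else loopA rank rest2 (file + 1) acc
        | none => loopA rank rest2 (file + 1) acc)
      | [] =>
        -- `i + 1 < len` fails: Python falls through to the unknown-character branch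
        loopA rank [] (file + 1) acc
    else loopA rank rest (file + 1) acc
termination_by cs.length
decreasing_by
  all_goals simp_all
  exact countX_snd_le rest

def parse_fen4 (fen4_str : String) : List (Int × Int × Int) :=
  let parts := PySem.Chars.split₀ (PySem.Chars.strip fen4_str.toList)
  match PySem.List.pyGet? parts 0 with
  | none => []  -- parts[0] raises IndexError in Python; excluded by Pre_parse_fen4
  | some rank_str =>
    let ranks := PySem.Chars.splitOn rank_str ['/']
    (PySem.List.enumerate ranks 0).foldl
      (fun pieces p => loopA (BOARD_SIZE - 1 - p.1) p.2 0 pieces) []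

-- ===== PORT B =====
-- Source B's `pending` variable: None | ('p', player_char) | ('d', digit_value)
inductive Pend where
  | none
  | player (c : Char)
  | digit (v : Int)
deriving DecidableEq, Repr

-- the tail of Source B's loop body (reached with pending = None, or by fall-through after a lone digit)
def freshB (file : Int) (acc : List (Int × Int × Int)) (ch : Char) :
    Int × Pend × List (Int × Int × Int) :=
  if (PySem.Dict.get? PLAYER_INDEX ch).isSome then (file, Pend.player ch, acc)
  else if PySem.Chars.isdigit ch then
    -- int(ch) never raises: ch is a digit char
    (file, Pend.digit ((PySem.Int.ofChars? [ch]).getD 0), acc)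
  else (file + 1, Pend.none, acc)

-- Source B's loop body: one character, state (file, pending, pieces)
def stepB (rank : Int) (st : Int × Pend × List (Int × Int × Int)) (ch : Char) :
    Int × Pend × List (Int × Int × Int) :=
  match st with
  | (file, Pend.player p, acc) =>
    (match PySem.Dict.get? PIECE_TYPE_INDEX ch with
    | some t =>
      if 0 ≤ rank * 14 + file ∧ rank * 14 + file < 196 then
        (file + 1, Pend.none, acc ++ [(rank * 14 + file, t, (PySem.Dict.get? PLAYER_INDEX p).getD 0)])
      else (file + 1, Pend.none, acc)
    | none => (file + 1, Pend.none, acc))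
  | (file, Pend.digit v, acc) =>
    if PySem.Chars.isdigit ch then (file + (10 * v + (PySem.Int.ofChars? [ch]).getD 0), Pend.none, acc)
    else freshB (file + v) acc ch
  | (file, Pend.none, acc) => freshB file acc ch

def parse_fen4_alt (fen4_str : String) : List (Int × Int × Int) :=
  match PySem.List.pyGet? (PySem.Chars.split₀ (PySem.Chars.strip fen4_str.toList)) 0 with
  | none => []  -- [0] raises IndexError in Python; excluded by Pre_parse_fen4
  | some rank_str =>
    (PySem.List.enumerate (PySem.Chars.splitOn rank_str ['/']) 0).foldl
      (fun pieces p => (p.2.foldl (stepB (13 - p.1)) (0, Pend.none, pieces)).2.2) []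

-- ===== PRECONDITION & SPEC =====
-- Pre_ excludes exactly the all-whitespace strings, on which A's parts[0] raises IndexError.
def Pre_parse_fen4 (fen4_str : String) : Prop :=
  PySem.Chars.split₀ (PySem.Chars.strip fen4_str.toList) ≠ []
instance (fen4_str : String) : Decidable (Pre_parse_fen4 fen4_str) := by
  unfold Pre_parse_fen4; infer_instance
def pvWitness_parse_fen4 : String := "3,yK,x/rP2bN A - - -"

def Spec_parse_fen4 (fen4_str : String) (out : List (Int × Int × Int)) : Prop :=
  out = parse_fen4_alt fen4_str
instance (fen4_str : String) (out : List (Int × Int × Int)) : Decidable (Spec_parse_fen4 fen4_str out) := by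
  unfold Spec_parse_fen4; infer_instance

-- ===== CLAIM (what is proved, stated in full; the proofs are below) =====
def Claim_equal_parse_fen4 : Prop := ∀ (fen4_str : String), Dom_parse_fen4 fen4_str →
  Pre_parse_fen4 fen4_str → Spec_parse_fen4 fen4_str (parse_fen4 fen4_str)

-- ===== LEMMAS AND PROOFS =====
def DIGITS : List Char := ['0', '1', '2', '3', '4', '5', '6', '7', '8', '9']

theorem isdigit_mem (c : Char) (h : PySem.Chars.isdigit c = true) : c ∈ DIGITS := by
  simp only [PySem.Chars.isdigit, Bool.and_eq_true, decide_eq_true_eq] at h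
  obtain ⟨h1, h2⟩ := h
  rw [Char.le_def, UInt32.le_iff_toNat_le] at h1 h2
  have hc : ∀ (d : Char), c.val.toNat = d.val.toNat → c = d := by
    intro d hd
    exact Char.ext (UInt32.toNat_inj.mp hd)
  have e0 : ('0' : Char).val.toNat = 48 := by decide
  have e9 : ('9' : Char).val.toNat = 57 := by decide
  rw [e0] at h1; rw [e9] at h2
  interval_cases c.val.toNat <;> simp only [DIGITS, List.mem_cons, List.not_mem_nil, or_false] <;>
    [ exact Or.inl (hc '0' (by decide));
      exact Or.inr (Or.inl (hc '1' (by decide)));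
      exact Or.inr (Or.inr (Or.inl (hc '2' (by decide))));
      exact Or.inr (Or.inr (Or.inr (Or.inl (hc '3' (by decide)))));
      exact Or.inr (Or.inr (Or.inr (Or.inr (Or.inl (hc '4' (by decide))))));
      exact Or.inr (Or.inr (Or.inr (Or.inr (Or.inr (Or.inl (hc '5' (by decide)))))));
      exact Or.inr (Or.inr (Or.inr (Or.inr (Or.inr (Or.inr (Or.inl (hc '6' (by decide))))))));
      exact Or.inr (Or.inr (Or.inr (Or.inr (Or.inr (Or.inr (Or.inr (Or.inl (hc '7' (by decide)))))))));
      exact Or.inr (Or.inr (Or.inr (Or.inr (Or.inr (Or.inr (Or.inr (Or.inr (Or.inl (hc '8' (by decide))))))))));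
      exact Or.inr (Or.inr (Or.inr (Or.inr (Or.inr (Or.inr (Or.inr (Or.inr (Or.inr (hc '9' (by decide))))))))))]

theorem two_digit_val : ∀ c ∈ DIGITS, ∀ d ∈ DIGITS,
    (PySem.Int.ofChars? [c, d]).getD 0 =
      10 * (PySem.Int.ofChars? [c]).getD 0 + (PySem.Int.ofChars? [d]).getD 0 := by
  intro c hc d hd; fin_cases hc <;> fin_cases hd <;> decide

theorem not_player_x : PySem.Dict.get? PLAYER_INDEX 'x' = none := by decide
theorem not_digit_x : PySem.Chars.isdigit 'x' = false := by decide

theorem digit_not_player (c : Char) (h : PySem.Chars.isdigit c = true) :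
    PySem.Dict.get? PLAYER_INDEX c = none := by
  have := isdigit_mem c h
  fin_cases this <;> decide

-- A's jump over an 'x'-run equals advancing one 'x' at a time
theorem loopA_x (rank : Int) (rest : List Char) (file : Int) (acc : List (Int × Int × Int)) :
    loopA rank ('x' :: rest) file acc = loopA rank rest (file + 1) acc := by
  cases rest with
  | nil => simp [loopA.eq_def, countX]
  | cons c r2 =>
    by_cases h : c = 'x'
    · subst h
      conv_lhs => rw [loopA.eq_def]
      conv_rhs => rw [loopA.eq_def]
      simp [countX]
      congr 1
      ring
    · conv_lhs => rw [loopA.eq_def]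
      simp [countX, h]

-- the per-rank equivalence: B's fold from a clean state computes A's indexed loop
theorem rank_eq (rank : Int) (n : Nat) : ∀ (cs : List Char), cs.length ≤ n →
    ∀ (file : Int) (acc : List (Int × Int × Int)),
    (cs.foldl (stepB rank) (file, Pend.none, acc)).2.2 = loopA rank cs file acc := by
  induction n with
  | zero =>
    intro cs h file acc
    have : cs = [] := List.eq_nil_of_length_eq_zero (Nat.le_zero.mp h)
    subst this
    rw [loopA.eq_def]
    rfl
  | succ n ih =>
    intro cs h file acc
    cases cs with
    | nil => rw [loopA.eq_def]; rfl
    | cons ch rest =>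
      have hr : rest.length ≤ n := by simpa using h
      by_cases hx : ch = 'x'
      · subst hx
        rw [loopA_x]
        have hstep : stepB rank (file, Pend.none, acc) 'x' = (file + 1, Pend.none, acc) := by
          simp [stepB, freshB, not_player_x, not_digit_x]
        rw [List.foldl_cons, hstep]
        exact ih rest hr (file + 1) acc
      · by_cases hd : PySem.Chars.isdigit ch = true
        · have hpl : PySem.Dict.get? PLAYER_INDEX ch = none := digit_not_player ch hd
          have hstep : stepB rank (file, Pend.none, acc) ch
              = (file, Pend.digit ((PySem.Int.ofChars? [ch]).getD 0), acc) := by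
            simp [stepB, freshB, hpl, hd]
          rw [List.foldl_cons, hstep]
          cases rest with
          | nil =>
            conv_rhs => rw [loopA.eq_def]
            simp [hx, hd]
            rw [loopA.eq_def]
          | cons c2 rest2 =>
            have hr2 : rest2.length ≤ n := by simp at hr; omega
            by_cases hd2 : PySem.Chars.isdigit c2 = true
            · have hstep2 : stepB rank (file, Pend.digit ((PySem.Int.ofChars? [ch]).getD 0), acc) c2
                  = (file + (10 * (PySem.Int.ofChars? [ch]).getD 0 + (PySem.Int.ofChars? [c2]).getD 0),
                      Pend.none, acc) := by
                simp [stepB, hd2]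
              rw [List.foldl_cons, hstep2]
              conv_rhs => rw [loopA.eq_def]
              simp only [hx, hd, hd2, if_false, if_pos]
              rw [two_digit_val ch (isdigit_mem ch hd) c2 (isdigit_mem c2 hd2)]
              exact ih rest2 hr2 _ acc
            · have hstep2 : stepB rank (file, Pend.digit ((PySem.Int.ofChars? [ch]).getD 0), acc) c2
                  = stepB rank (file + (PySem.Int.ofChars? [ch]).getD 0, Pend.none, acc) c2 := by
                simp [stepB, hd2]
              rw [List.foldl_cons, hstep2, ← List.foldl_cons]
              conv_rhs => rw [loopA.eq_def]
              simp only [hx, hd, hd2, ite_false, if_pos, Bool.false_eq_true]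
              exact ih (c2 :: rest2) hr _ acc
        · by_cases hp : (PySem.Dict.get? PLAYER_INDEX ch).isSome = true
          · have hstep : stepB rank (file, Pend.none, acc) ch = (file, Pend.player ch, acc) := by
              simp [stepB, freshB, hp]
            rw [List.foldl_cons, hstep]
            cases rest with
            | nil =>
              conv_rhs => rw [loopA.eq_def]
              simp [hx, hd, hp]
              rw [loopA.eq_def]
            | cons c2 rest2 =>
              have hr2 : rest2.length ≤ n := by simp at hr; omega
              conv_rhs => rw [loopA.eq_def]
              simp only [hx, hd, hp, ite_false, if_pos, Bool.false_eq_true]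
              rw [List.foldl_cons]
              cases hpc : PySem.Dict.get? PIECE_TYPE_INDEX c2 with
              | none =>
                have hstep2 : stepB rank (file, Pend.player ch, acc) c2 = (file + 1, Pend.none, acc) := by
                  simp [stepB, hpc]
                rw [hstep2]
                exact ih rest2 hr2 _ acc
              | some t =>
                have h14 : rank * BOARD_SIZE + file = rank * 14 + file := by norm_num [BOARD_SIZE]
                by_cases hin : 0 ≤ rank * 14 + file ∧ rank * 14 + file < 196
                · have hstep2 : stepB rank (file, Pend.player ch, acc) c2
                      = (file + 1, Pend.none,
                          acc ++ [(rank * 14 + file, t, (PySem.Dict.get? PLAYER_INDEX ch).getD 0)]) := by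
                    simp [stepB, hpc, hin]
                  rw [hstep2]
                  simp only [TOTAL_SQUARES, h14, hin]
                  exact ih rest2 hr2 _ _
                · have hstep2 : stepB rank (file, Pend.player ch, acc) c2 = (file + 1, Pend.none, acc) := by
                    simp [stepB, hpc, hin]
                  rw [hstep2]
                  simp only [TOTAL_SQUARES, h14, hin]
                  exact ih rest2 hr2 _ acc
          · have hstep : stepB rank (file, Pend.none, acc) ch = (file + 1, Pend.none, acc) := by
              simp [stepB, freshB, hp, hd]
            rw [List.foldl_cons, hstep]
            conv_rhs => rw [loopA.eq_def]
            simp only [hx, hd, hp, ite_false, Bool.false_eq_true]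
            exact ih rest hr _ acc

theorem outer_eq (L : List (Int × List Char)) (acc : List (Int × Int × Int)) :
    L.foldl (fun pieces p => (p.2.foldl (stepB (13 - p.1)) (0, Pend.none, pieces)).2.2) acc
      = L.foldl (fun pieces p => loopA (BOARD_SIZE - 1 - p.1) p.2 0 pieces) acc := by
  induction L generalizing acc with
  | nil => rfl
  | cons q t ih =>
    simp only [List.foldl_cons]
    rw [rank_eq (13 - q.1) q.2.length q.2 le_rfl 0 acc]
    have : BOARD_SIZE - 1 - q.1 = 13 - q.1 := by unfold BOARD_SIZE; ring
    rw [this, ih]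

-- ===== VERDICT (by name: the statement is the Claim_ definition above) =====
theorem parse_fen4_spec : Claim_equal_parse_fen4 := by
  intro s _ hpre
  unfold Spec_parse_fen4 parse_fen4 parse_fen4_alt
  unfold Pre_parse_fen4 at hpre
  cases hg : PySem.List.pyGet? (PySem.Chars.split₀ (PySem.Chars.strip s.toList)) 0 with
  | none =>
    exfalso
    apply hpre
    cases hl : PySem.Chars.split₀ (PySem.Chars.strip s.toList) with
    | nil => rfl
    | cons a t =>
      rw [hl] at hg
      simp [PySem.List.pyGet?, PySem.List.pyIdx?] at hg
  | some r =>
    simp only [hg]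
    exact (outer_eq _ _).symm
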